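-- pv_equiv track=rewrite | github.com/JavierTham/CS3244 | src/knn.py | compress_column
-- ===== SOURCE A (Python) =====
-- def compress_row(lst):
--   result_lst = []
--   temp_lst = []
--   new_num = 0
--   if len(lst)%2 != 0:
--     return lst
--   else:
--     for i in lst:
--       temp_lst.append(i)
--       if len(temp_lst) == 2:
--         new_num = temp_lst[0] + temp_lst[1]
--         result_lst.append(new_num)
--         temp_lst = []
--   return result_lst
--
-- def compress_column(matrix):
--   result_lst = []
--   temp_lst = []
--   i = 0
--   if len(matrix)%2 != 0:
--     return matrix
--   else:
--     number_of_row = len(matrix)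
--     number_of_column = len(matrix[0])
--     while i < number_of_row:
--       for j in range(number_of_column):
--         temp_lst.append(matrix[i][j])
--         temp_lst.append(matrix[i+1][j])
--       result_lst.append(compress_row(temp_lst))
--       temp_lst = []
--       i = i +2
--     return result_lst
-- ===== SOURCE B (Python) =====
-- def compress_column(matrix):
--   if len(matrix) % 2 != 0:
--     return matrix
--   result = []
--   for i in range(0, len(matrix), 2):
--     result.append([matrix[i][j] + matrix[i+1][j] for j in range(len(matrix[0]))])
--   return result
-- ===== Notes on version B (the rewrite author's own statement) =====
-- stated objective: simpler
-- what changed: B drops the interleaved temp_lst and the compress_row pairing helper entirely, summing each row pair column-wise in one direct comprehension per pair.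
import Mathlib
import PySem

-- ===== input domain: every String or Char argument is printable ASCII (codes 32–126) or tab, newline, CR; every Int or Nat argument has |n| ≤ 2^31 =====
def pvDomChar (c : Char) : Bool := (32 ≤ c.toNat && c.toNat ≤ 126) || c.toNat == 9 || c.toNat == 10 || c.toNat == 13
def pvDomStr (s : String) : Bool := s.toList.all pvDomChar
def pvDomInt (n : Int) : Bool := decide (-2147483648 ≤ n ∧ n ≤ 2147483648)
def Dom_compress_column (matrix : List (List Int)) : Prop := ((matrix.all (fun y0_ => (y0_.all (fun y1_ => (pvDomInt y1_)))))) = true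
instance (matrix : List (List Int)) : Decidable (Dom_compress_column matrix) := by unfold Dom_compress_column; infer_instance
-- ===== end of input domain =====

-- B drops the interleaved temp_lst and the compress_row pairing helper, summing each row pair
-- column-wise directly; objective: simpler. Return-value equivalence only (neither mutates).

-- ===== PORT A =====
-- the body of compress_row's for-loop: state = (result_lst, temp_lst)
def crStep (st : List Int × List Int) (i : Int) : List Int × List Int :=
  let temp := st.2 ++ [i]
  if temp.length = 2 then
    (st.1 ++ [(PySem.List.pyGet? temp 0).getD 0 + (PySem.List.pyGet? temp 1).getD 0], [])
  else (st.1, temp)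

-- port of A's helper compress_row (the dead `new_num = 0` initialisation carries no state)
def compress_row (lst : List Int) : List Int :=
  if lst.length % 2 ≠ 0 then lst
  else (lst.foldl crStep ([], [])).1

-- the `while i < number_of_row` loop of A (i advances by 2); indexing via pyGet? (.getD only
-- fires outside Pre_, where Python raises)
def ccLoop (matrix : List (List Int)) (ncol nrow i : Int) (acc : List (List Int)) :
    List (List Int) :=
  if _h : i < nrow then
    let temp := (PySem.List.pyRange 0 ncol 1).foldl
      (fun t j =>
        t ++ [(PySem.List.pyGet? ((PySem.List.pyGet? matrix i).getD []) j).getD 0,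
              (PySem.List.pyGet? ((PySem.List.pyGet? matrix (i+1)).getD []) j).getD 0]) []
    ccLoop matrix ncol nrow (i+2) (acc ++ [compress_row temp])
  else acc
  termination_by (nrow - i).toNat
  decreasing_by omega

def compress_column (matrix : List (List Int)) : List (List Int) :=
  if matrix.length % 2 ≠ 0 then matrix
  else
    let number_of_row : Int := matrix.length
    let number_of_column : Int := ((PySem.List.pyGet? matrix 0).getD []).length
    ccLoop matrix number_of_column number_of_row 0 []

-- ===== PORT B =====
def compress_column_alt (matrix : List (List Int)) : List (List Int) :=
  if matrix.length % 2 ≠ 0 then matrix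
  else
    (PySem.List.pyRange 0 matrix.length 2).foldl
      (fun res i =>
        res ++ [(PySem.List.pyRange 0 ((PySem.List.pyGet? matrix 0).getD []).length 1).map
          (fun j =>
            (PySem.List.pyGet? ((PySem.List.pyGet? matrix i).getD []) j).getD 0 +
            (PySem.List.pyGet? ((PySem.List.pyGet? matrix (i+1)).getD []) j).getD 0)]) []

-- ===== PRECONDITION & SPEC =====
-- Pre_ excludes exactly the inputs where Python A raises IndexError: even-length input that is
-- empty (matrix[0]) or has a row shorter than row 0 (matrix[i][j]).
def Pre_compress_column (matrix : List (List Int)) : Prop :=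
  matrix.length % 2 = 1 ∨
    (matrix ≠ [] ∧ ∀ row ∈ matrix, matrix.headI.length ≤ row.length)
instance (matrix : List (List Int)) : Decidable (Pre_compress_column matrix) := by
  unfold Pre_compress_column; infer_instance

def pvWitness_compress_column : List (List Int) := [[1, 2], [3, 4]]

def Spec_compress_column (matrix : List (List Int)) (out : List (List Int)) : Prop :=
  out = compress_column_alt matrix
instance (matrix : List (List Int)) (out : List (List Int)) :
    Decidable (Spec_compress_column matrix out) := by unfold Spec_compress_column; infer_instance

-- ===== CLAIM (what is proved, stated in full; the proofs are below) =====
def Claim_equal_compress_column : Prop :=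
  ∀ (matrix : List (List Int)), Dom_compress_column matrix → Pre_compress_column matrix →
    Spec_compress_column matrix (compress_column matrix)

-- ===== LEMMAS AND PROOFS =====

-- cons form of range(a, b, 2)
theorem pyRange_two_cons (a b : Int) (h : a < b) :
    PySem.List.pyRange a b 2 = a :: PySem.List.pyRange (a + 2) b 2 := by
  rw [PySem.List.pyRange_of_pos a b (by norm_num),
      PySem.List.pyRange_of_pos (a + 2) b (by norm_num)]
  by_cases h2 : a + 2 < b
  · rw [if_pos h, if_pos h2,
      show ((b - a + 2 - 1) / 2).toNat = ((b - (a + 2) + 2 - 1) / 2).toNat + 1 by omega,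
      List.range_succ_eq_map]
    simp [List.map_map, Function.comp_def]
    intro k _
    ring
  · rw [if_pos h, if_neg h2, show ((b - a + 2 - 1) / 2).toNat = 1 by omega]
    simp [List.range_succ]
-- the inner fold of compress_row on an interleaved list pairs the elements back up
theorem crFold (a b : Int → Int) (js : List Int) (res : List Int) :
    ((js.flatMap (fun j => [a j, b j])).foldl crStep (res, [])) =
      (res ++ js.map (fun j => a j + b j), []) := by
  induction js generalizing res with
  | nil => simp
  | cons j js ih =>
      rw [List.flatMap_cons, List.cons_append, List.cons_append, List.nil_append,
        List.foldl_cons, List.foldl_cons,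
        show crStep (res, []) (a j) = (res, [a j]) by simp [crStep],
        show crStep (res, [a j]) (b j) = (res ++ [a j + b j], []) by
          simp [crStep, PySem.List.pyGet?, PySem.List.pyIdx?],
        ih]
      simp

theorem compress_row_interleave (a b : Int → Int) (js : List Int) :
    compress_row (js.flatMap (fun j => [a j, b j])) = js.map (fun j => a j + b j) := by
  have hlen : (js.flatMap (fun j => [a j, b j])).length % 2 = 0 := by
    induction js with
    | nil => simp
    | cons j js ih => simp [List.flatMap_cons] at ih ⊢; omega
  unfold compress_row
  rw [if_neg (by omega), crFold]
  simp

-- the row A builds for pair index i equals B's direct column-sum row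
theorem rowA_eq_rowB (matrix : List (List Int)) (ncol i : Int) :
    compress_row ((PySem.List.pyRange 0 ncol 1).foldl
      (fun t j =>
        t ++ [(PySem.List.pyGet? ((PySem.List.pyGet? matrix i).getD []) j).getD 0,
              (PySem.List.pyGet? ((PySem.List.pyGet? matrix (i+1)).getD []) j).getD 0]) []) =
    (PySem.List.pyRange 0 ncol 1).map
      (fun j =>
        (PySem.List.pyGet? ((PySem.List.pyGet? matrix i).getD []) j).getD 0 +
        (PySem.List.pyGet? ((PySem.List.pyGet? matrix (i+1)).getD []) j).getD 0) := by
  rw [PySem.List.foldl_append_eq_flatMap, List.nil_append, compress_row_interleave]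

-- A's while-loop is B's map over range(0, nrow, 2)
theorem ccLoop_eq (matrix : List (List Int)) (ncol nrow : Int) :
    ∀ (i : Int) (acc : List (List Int)),
      ccLoop matrix ncol nrow i acc = acc ++ (PySem.List.pyRange i nrow 2).map
        (fun i => (PySem.List.pyRange 0 ncol 1).map
          (fun j =>
            (PySem.List.pyGet? ((PySem.List.pyGet? matrix i).getD []) j).getD 0 +
            (PySem.List.pyGet? ((PySem.List.pyGet? matrix (i+1)).getD []) j).getD 0)) := by
  suffices hfuel : ∀ (n : Nat) (i : Int) (acc : List (List Int)), (nrow - i).toNat ≤ n →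
      ccLoop matrix ncol nrow i acc = acc ++ (PySem.List.pyRange i nrow 2).map
        (fun i => (PySem.List.pyRange 0 ncol 1).map
          (fun j =>
            (PySem.List.pyGet? ((PySem.List.pyGet? matrix i).getD []) j).getD 0 +
            (PySem.List.pyGet? ((PySem.List.pyGet? matrix (i+1)).getD []) j).getD 0)) by
    intro i acc; exact hfuel (nrow - i).toNat i acc le_rfl
  intro n
  induction n with
  | zero =>
      intro i acc hn
      have h : ¬ i < nrow := by omega
      rw [ccLoop, dif_neg h,
        PySem.List.pyRange_of_pos i nrow (by norm_num), if_neg h]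
      simp
  | succ n ih =>
      intro i acc hn
      rw [ccLoop]
      by_cases h : i < nrow
      · rw [dif_pos h, ih (i + 2) _ (by omega), pyRange_two_cons i nrow h, List.map_cons,
          rowA_eq_rowB]
        simp
      · rw [dif_neg h, PySem.List.pyRange_of_pos i nrow (by norm_num), if_neg h]
        simp

-- ===== VERDICT (by name: the statement is the Claim_ definition above) =====
theorem compress_column_spec : Claim_equal_compress_column := by
  intro matrix _ _
  unfold Spec_compress_column compress_column compress_column_alt
  by_cases h : matrix.length % 2 ≠ 0
  · rw [if_pos h, if_pos h]
  · rw [if_neg h, if_neg h]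
    show ccLoop matrix (((PySem.List.pyGet? matrix 0).getD []).length : Int)
        (matrix.length : Int) 0 [] = _
    rw [ccLoop_eq, PySem.List.foldl_append_singleton_eq_map]
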